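-- pv_equiv track=rewrite | github.com/shruthipate/summer_training | summer training/day16/largest_even.py | larg_even
-- ===== SOURCE A (Python) =====
-- def larg_even(l1, l2):
--     digit1 = []
--     for char in l1:
--         if char.isdigit():
--             digit1.append(char)
--
--     digit2 = []
--     for char in l2:
--         if char.isdigit():
--             digit2.append(char)
--
--     c = digit1 + digit2
--     unique_digits = list(set(c))
--     unique_digits.sort(reverse=True)
--     for i in range(len(unique_digits)-1,-1,-1):
--         if int(unique_digits[i]) % 2 == 0:
--             even_digit = unique_digits.pop(i)
--             break
--     else:
--         return "No even digit found"
--     largest_number = ''.join(unique_digits) + even_digit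
--     return largest_number
-- ===== SOURCE B (Python) =====
-- def larg_even(l1, l2):
--     present = [False] * 10
--     for ch in l1:
--         if ch.isdigit():
--             present[ord(ch) - 48] = True
--     for ch in l2:
--         if ch.isdigit():
--             present[ord(ch) - 48] = True
--     last = next((d for d in range(0, 10, 2) if present[d]), None)
--     if last is None:
--         return "No even digit found"
--     present[last] = False
--     return ''.join(chr(48 + d) for d in range(9, -1, -1) if present[d]) + chr(48 + last)
-- ===== Notes on version B (the rewrite author's own statement) =====
-- stated objective: alternative
-- what changed: Replaces A's build-a-set / sort-descending / reverse-index-scan-with-pop pipeline by a 10-slot boolean presence table filled in one marking pass, an ascending scan over the even slots 0,2,4,6,8 for the final digit, and a direct descending 9..0 sweep over the table to emit the remaining digits (no set, no sort, no pop).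
import Mathlib
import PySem

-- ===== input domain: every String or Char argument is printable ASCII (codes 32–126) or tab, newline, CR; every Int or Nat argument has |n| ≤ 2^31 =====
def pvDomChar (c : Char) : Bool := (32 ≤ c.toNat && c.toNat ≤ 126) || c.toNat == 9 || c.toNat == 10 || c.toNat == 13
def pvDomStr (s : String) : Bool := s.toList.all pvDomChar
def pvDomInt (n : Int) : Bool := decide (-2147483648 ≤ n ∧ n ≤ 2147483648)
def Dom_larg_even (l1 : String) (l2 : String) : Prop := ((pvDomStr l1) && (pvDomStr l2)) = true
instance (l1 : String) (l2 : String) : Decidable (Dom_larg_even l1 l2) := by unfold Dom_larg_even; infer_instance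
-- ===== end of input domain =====

-- B replaces A's set/sort/reverse-scan-with-pop pipeline by a 10-slot boolean presence table, an
-- ascending scan of the even slots, and a direct descending 9..0 sweep (objective: alternative).

-- ===== PORT A =====
-- the 'for i in range(len(ud)-1,-1,-1): … break / else: return' loop; pop(i) via PySem.List.pop?;
-- ''.join(list-of-1-char-strings) + even_digit is exactly String.ofList (remaining ++ [ev]).
def largEvenLoop (ud : List Char) : List Int → String
  | [] => "No even digit found"
  | i :: rest =>
    -- int(ud[i]) % 2 == 0 : ud[i] is a digit char, int() via PySem.Int.ofChars?; % 2 with positive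
    -- divisor agrees between Python and Lean's Int.
    if (PySem.Int.ofChars? [PySem.List.pyGetD ud i ' ']).getD 0 % 2 == 0 then
      match PySem.List.pop? ud i with
      | some (ev, remaining) => String.ofList (remaining ++ [ev])
      | none => "No even digit found"   -- unreachable: i ranges over valid indices
    else largEvenLoop ud rest

def larg_even (l1 : String) (l2 : String) : String :=
  let digit1 := l1.toList.foldl (fun acc ch => if PySem.Str.isdigit ch then acc ++ [ch] else acc) []
  let digit2 := l2.toList.foldl (fun acc ch => if PySem.Str.isdigit ch then acc ++ [ch] else acc) []
  let c := digit1 ++ digit2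
  -- list(set(c)) followed by .sort(reverse=True): the result does not depend on the set's hash
  -- order (sorted without key), so sorting PySem.Set.ofList c is exact.
  let unique_digits := PySem.List.sorted (PySem.Set.ofList c) (fun x => x) true
  largEvenLoop unique_digits (PySem.List.pyRange ((unique_digits.length : Int) - 1) (-1) (-1))

-- ===== PORT B =====
-- 'for ch in s: if ch.isdigit(): present[ord(ch)-48] = True' — the index ord(ch)-48 is in 0..9
-- exactly when ch is a digit, so List.set is exact (never an IndexError).
def markDigits (s : List Char) (present : List Bool) : List Bool :=
  s.foldl (fun p ch => if PySem.Str.isdigit ch then p.set (ch.toNat - 48) true else p) present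

-- the part of Source B after the two marking loops, as a function of the finished table:
-- 'next((d for d in range(0,10,2) if present[d]), None)' = find? over pyRange 0 10 2 (d is 0..8,
-- so present[d] = getD, in range); then 'present[last] = False' and the descending join.
def buildFromTable (present : List Bool) : String :=
  match (PySem.List.pyRange 0 10 2).find? (fun d => present.getD d.toNat false) with
  | none => "No even digit found"
  | some last =>
    let present' := present.set last.toNat false
    String.ofList
      ((PySem.List.pyRange 9 (-1) (-1)).foldl
        (fun acc d => if present'.getD d.toNat false then acc ++ [Char.ofNat (48 + d.toNat)] else acc) []
       ++ [Char.ofNat (48 + last.toNat)])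

def larg_even_alt (l1 : String) (l2 : String) : String :=
  buildFromTable (markDigits l2.toList (markDigits l1.toList (List.replicate 10 false)))

-- ===== PRECONDITION & SPEC =====
def Spec_larg_even (l1 : String) (l2 : String) (out : String) : Prop := out = larg_even_alt l1 l2
instance (l1 : String) (l2 : String) (out : String) : Decidable (Spec_larg_even l1 l2 out) := by unfold Spec_larg_even; infer_instance

-- ===== CLAIM (what is proved, stated in full; the proofs are below) =====
def Claim_equal_larg_even : Prop := ∀ (l1 : String) (l2 : String), Dom_larg_even l1 l2 → Spec_larg_even l1 l2 (larg_even l1 l2)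

-- ===== LEMMAS AND PROOFS =====

-- the ten digit characters in descending order
def DESC : List Char := ['9','8','7','6','5','4','3','2','1','0']

-- A's whole computation after the sort, as a function of the sorted unique-digit list
def F (ud : List Char) : String :=
  largEvenLoop ud (PySem.List.pyRange ((ud.length : Int) - 1) (-1) (-1))

-- the sorted unique-digit list determined by a presence table
def udOf (t : List Bool) : List Char :=
  DESC.filter (fun x => t.getD (x.toNat - 48) false)

-- the presence table determined by a character list
def tableOf (s : List Char) : List Bool :=
  (List.range 10).map (fun i => s.any (fun ch => PySem.Str.isdigit ch && (ch.toNat - 48 == i)))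

-- all boolean lists of length n
def tables : Nat → List (List Bool)
  | 0 => [[]]
  | n + 1 => (tables n).flatMap (fun t => [false :: t, true :: t])

lemma mem_tables (t : List Bool) : t ∈ tables t.length := by
  induction t with
  | nil => simp [tables]
  | cons b t ih =>
    simp only [List.length_cons, tables, List.mem_flatMap]
    exact ⟨t, ih, by cases b <;> simp⟩

lemma foldl_if_append (p : Char → Bool) (xs : List Char) (acc : List Char) :
    xs.foldl (fun acc ch => if p ch then acc ++ [ch] else acc) acc = acc ++ xs.filter p := by
  induction xs generalizing acc with
  | nil => simp
  | cons x xs ih =>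
    simp only [List.foldl_cons, List.filter_cons]
    by_cases h : p x = true <;> simp [h, ih]

lemma mem_DESC_of_digit (c : Char) (h : PySem.Str.isdigit c = true) : c ∈ DESC := by
  simp only [PySem.Str.isdigit, PySem.Chars.isdigit, Bool.and_eq_true, decide_eq_true_eq] at h
  obtain ⟨h1, h2⟩ := h
  rw [Char.le_def] at h1 h2
  have hv : 48 ≤ c.toNat ∧ c.toNat ≤ 57 := ⟨h1, h2⟩
  have h10 : c.toNat = 48 ∨ c.toNat = 49 ∨ c.toNat = 50 ∨ c.toNat = 51 ∨ c.toNat = 52 ∨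
      c.toNat = 53 ∨ c.toNat = 54 ∨ c.toNat = 55 ∨ c.toNat = 56 ∨ c.toNat = 57 := by omega
  rcases h10 with h|h|h|h|h|h|h|h|h|h <;> (rw [← Char.ofNat_toNat c, h]; decide)

lemma pairwise_gt_DESC : DESC.Pairwise (fun a b : Char => b < a) := by decide

lemma nodup_DESC : DESC.Nodup := by decide

lemma sorted_set_eq (c : List Char) (hc : ∀ x ∈ c, x ∈ DESC) :
    PySem.List.sorted (PySem.Set.ofList c) (fun x => x) true = DESC.filter (fun x => c.contains x) := by
  apply PySem.List.sorted_rev_eq_of_perm_of_pairwise_gt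
  · rw [List.perm_ext_iff_of_nodup (List.Nodup.filter _ nodup_DESC) (PySem.Set.nodup_ofList c)]
    intro a
    simp only [List.mem_filter, PySem.Set.mem_ofList, List.contains_iff_mem]
    exact ⟨fun h => h.2, fun h => ⟨hc a h, h⟩⟩
  · exact pairwise_gt_DESC.filter _

lemma markDigits_length (s : List Char) (p : List Bool) :
    (markDigits s p).length = p.length := by
  induction s generalizing p with
  | nil => rfl
  | cons ch s ih =>
    simp only [markDigits, List.foldl_cons] at *
    by_cases h : PySem.Str.isdigit ch = true <;> simp [h, ih, List.length_set]

lemma digit_toNat_range (ch : Char) (h : PySem.Str.isdigit ch = true) :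
    48 ≤ ch.toNat ∧ ch.toNat ≤ 57 := by
  simp only [PySem.Str.isdigit, PySem.Chars.isdigit, Bool.and_eq_true, decide_eq_true_eq] at h
  obtain ⟨h1, h2⟩ := h
  rw [Char.le_def] at h1 h2
  exact ⟨h1, h2⟩

lemma markDigits_getD (s : List Char) (p : List Bool) (hp : p.length = 10) (i : Nat) (hi : i < 10) :
    (markDigits s p).getD i false
      = (p.getD i false || s.any (fun ch => PySem.Str.isdigit ch && (ch.toNat - 48 == i))) := by
  induction s generalizing p with
  | nil => simp [markDigits]
  | cons ch s ih =>
    simp only [markDigits, List.foldl_cons, List.any_cons] at *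
    by_cases h : PySem.Str.isdigit ch = true
    · have hr := digit_toNat_range ch h
      have hk : ch.toNat - 48 < 10 := by omega
      have hlen : (p.set (ch.toNat - 48) true).length = 10 := by simp [hp]
      rw [if_pos h, ih (p.set (ch.toNat - 48) true) hlen]
      have hset : (p.set (ch.toNat - 48) true).getD i false
          = (if ch.toNat - 48 = i then true else p.getD i false) := by
        rcases eq_or_ne (ch.toNat - 48) i with he | hne
        · subst he
          simp [List.getD, hp, hk]
        · simp [List.getD, List.getElem?_set_ne hne, hne]
      rw [hset]
      by_cases he : ch.toNat - 48 = i
      · simp [he, h]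
      · simp only [he, if_false]
        have : (ch.toNat - 48 == i) = false := by simp [he]
        simp [h, this]
    · have hb : PySem.Str.isdigit ch = false := by simpa using h
      rw [if_neg h, ih p hp]
      simp [hb]

lemma tableOf_getD (s : List Char) (i : Nat) (hi : i < 10) :
    (tableOf s).getD i false = s.any (fun ch => PySem.Str.isdigit ch && (ch.toNat - 48 == i)) := by
  simp [tableOf, List.getD, hi]

lemma markDigits_eq_tableOf (s1 s2 : List Char) :
    markDigits s2 (markDigits s1 (List.replicate 10 false)) = tableOf (s1 ++ s2) := by
  have hl1 : (markDigits s1 (List.replicate 10 false)).length = 10 := by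
    rw [markDigits_length]; simp
  have hl2 : (markDigits s2 (markDigits s1 (List.replicate 10 false))).length = 10 := by
    rw [markDigits_length]; exact hl1
  have hlt : (tableOf (s1 ++ s2)).length = 10 := by simp [tableOf]
  apply List.ext_getElem (by rw [hl2, hlt])
  intro i h1 h2
  have hi : i < 10 := by omega
  rw [← List.getD_eq_getElem _ false h1, ← List.getD_eq_getElem _ false h2]
  rw [markDigits_getD s2 _ hl1 i hi, markDigits_getD s1 _ (by simp) i hi, tableOf_getD _ i hi]
  have hrep : (List.replicate 10 false).getD i false = false := by
    interval_cases i <;> rfl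
  rw [hrep]
  simp [List.any_append]

-- (s.filter P).contains a unfolded to a single any over s
lemma contains_filter (P : Char → Bool) (a : Char) (s : List Char) :
    (s.filter P).contains a = s.any (fun ch => P ch && (a == ch)) := by
  rw [Bool.eq_iff_iff]
  simp only [List.contains_iff_mem, List.mem_filter, List.any_eq_true, Bool.and_eq_true, beq_iff_eq]
  constructor
  · rintro ⟨hs, hp⟩
    exact ⟨a, hs, hp, rfl⟩
  · rintro ⟨x, hx, hp, he⟩
    subst he
    exact ⟨hx, hp⟩

lemma ofNat_digit_toNat (i : Nat) (hi : i < 10) : (Char.ofNat (48 + i)).toNat = 48 + i := by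
  have : 48 + i < 0xd800 := by omega
  simp [Char.ofNat, Char.ofNatAux, Nat.isValidChar, this]
  omega

-- a digit ch equals the digit char of value i exactly when its value is i
lemma any_digit_eq (s : List Char) (i : Nat) (hi : i < 10) :
    s.any (fun ch => PySem.Str.isdigit ch && (Char.ofNat (48 + i) == ch))
      = s.any (fun ch => PySem.Str.isdigit ch && (ch.toNat - 48 == i)) := by
  have hfun : (fun ch => PySem.Str.isdigit ch && (Char.ofNat (48 + i) == ch))
      = (fun ch => PySem.Str.isdigit ch && (ch.toNat - 48 == i)) := by
    funext ch
    by_cases h : PySem.Str.isdigit ch = true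
    · have hr := digit_toNat_range ch h
      have hofNat := ofNat_digit_toNat i hi
      congr 1
      by_cases he : ch.toNat - 48 = i
      · have hEq : Char.ofNat (48 + i) = ch := by
          have : ch.toNat = 48 + i := by omega
          rw [← this, Char.ofNat_toNat]
        simp [hEq, he]
      · have hne : Char.ofNat (48 + i) ≠ ch := by
          intro hEq
          apply he
          have := congrArg Char.toNat hEq
          rw [hofNat] at this
          omega
        have h1 : (Char.ofNat (48 + i) == ch) = false := by
          simp [hne]
        have h2 : (ch.toNat - 48 == i) = false := by
          simp only [beq_eq_false_iff_ne, ne_eq]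
          exact he
        rw [h1, h2]
    · have hb : PySem.Str.isdigit ch = false := by simpa using h
      simp [hb]
  rw [hfun]

lemma contains_filter_digit (s : List Char) (i : Nat) (hi : i < 10) :
    (s.filter PySem.Str.isdigit).contains (Char.ofNat (48 + i))
      = s.any (fun ch => PySem.Str.isdigit ch && (ch.toNat - 48 == i)) := by
  rw [contains_filter, any_digit_eq s i hi]

lemma contains_tableOf (s : List Char) (x : Char) (hx : x ∈ DESC) :
    (s.filter PySem.Str.isdigit).contains x = (tableOf s).getD (x.toNat - 48) false := by
  have hx10 : x.toNat - 48 < 10 ∧ Char.ofNat (48 + (x.toNat - 48)) = x := by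
    fin_cases hx <;> exact ⟨by decide, by decide⟩
  obtain ⟨h1, h2⟩ := hx10
  rw [tableOf_getD s _ h1, ← contains_filter_digit s _ h1, h2]

lemma ud_eq_udOf (s : List Char) :
    DESC.filter (fun x => (s.filter PySem.Str.isdigit).contains x) = udOf (tableOf s) := by
  unfold udOf
  exact List.filter_congr (fun x hx => contains_tableOf s x hx)

lemma tableOf_length (s : List Char) : (tableOf s).length = 10 := by simp [tableOf]

set_option maxHeartbeats 2000000 in
set_option maxRecDepth 10000 in
lemma key_FH : ∀ t ∈ tables 10, F (udOf t) = buildFromTable t := by decide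

-- ===== VERDICT (by name: the statement is the Claim_ definition above) =====
theorem larg_even_spec : Claim_equal_larg_even := by
  intro l1 l2 _
  unfold Spec_larg_even larg_even larg_even_alt
  simp only [foldl_if_append, List.nil_append]
  rw [← List.filter_append]
  set s := l1.toList ++ l2.toList with hs_def
  set c := s.filter PySem.Str.isdigit with hc_def
  have hc : ∀ x ∈ c, x ∈ DESC := fun x hx => mem_DESC_of_digit x (List.of_mem_filter hx)
  rw [sorted_set_eq c hc]
  show F (DESC.filter (fun x => c.contains x)) = _
  rw [hc_def, ud_eq_udOf s]
  have hmem : tableOf s ∈ tables 10 := by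
    have := mem_tables (tableOf s)
    rwa [tableOf_length] at this
  rw [key_FH (tableOf s) hmem, markDigits_eq_tableOf]
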